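-- pv_equiv track=rewrite | github.com/LC-John/Fake-Trump-Tweet | trump_data/data_preprocess.py | get_letter_dict
-- ===== SOURCE A (Python) =====
-- def get_letter_dict(data, threshold=89):
--
--     cnt = {}
--     for s in data:
--         for l in s:
--             if l in cnt.keys():
--                 cnt[l] += 1
--             else:
--                 cnt[l] = 1
--     cnt = sorted(cnt.items(), key=lambda d: d[1], reverse=True)
--     letter_dict = {}
--     letter_cnt = 0
--     for key, val in cnt[:threshold]:
--         letter_dict[key] = letter_cnt
--         letter_cnt += 1
--     return letter_dict
-- ===== SOURCE B (Python) =====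
-- def get_letter_dict(data, threshold=89):
--     cnt = {}
--     for s in data:
--         for l in s:
--             cnt[l] = cnt.get(l, 0) + 1
--     buckets = {}
--     for l, c in cnt.items():
--         buckets.setdefault(c, []).append(l)
--     order = []
--     for f in range(max(buckets, default=0), 0, -1):
--         order.extend(buckets.get(f, []))
--     letter_dict = {}
--     for i, l in enumerate(order[:threshold]):
--         letter_dict[l] = i
--     return letter_dict
-- ===== Notes on version B (the rewrite author's own statement) =====
-- stated objective: alternative
-- what changed: Replaces A's comparison sort (sorted by count descending) with a counting sort: counts are inverted into frequency buckets that keep first-seen letter order, and buckets are emitted from the maximum frequency down, reproducing stable tie-breaking.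
import Mathlib
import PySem

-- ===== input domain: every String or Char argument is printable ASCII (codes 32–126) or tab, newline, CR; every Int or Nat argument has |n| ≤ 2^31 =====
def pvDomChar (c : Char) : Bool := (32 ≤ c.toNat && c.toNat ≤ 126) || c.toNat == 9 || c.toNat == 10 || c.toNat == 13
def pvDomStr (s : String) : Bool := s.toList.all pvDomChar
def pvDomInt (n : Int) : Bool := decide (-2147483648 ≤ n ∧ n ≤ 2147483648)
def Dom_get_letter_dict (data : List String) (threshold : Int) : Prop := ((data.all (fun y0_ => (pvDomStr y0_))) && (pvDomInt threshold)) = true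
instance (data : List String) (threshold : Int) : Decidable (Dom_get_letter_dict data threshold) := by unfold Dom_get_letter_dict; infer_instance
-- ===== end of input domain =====

-- B replaces A's comparison sort by count with a counting sort over frequency buckets
-- (buckets emitted from the maximum frequency down, first-seen order inside a bucket);
-- same return value, objective: alternative algorithm.

-- ===== PORT A =====
def get_letter_dict (data : List String) (threshold : Int) : List (String × Int) :=
  let cnt : PySem.Dict String Int :=
    data.foldl (fun cnt s =>
      s.toList.foldl (fun cnt l =>
        let ls := String.ofList [l]
        if cnt.contains ls then cnt.modify ls 0 (· + 1) else cnt.insert ls 1) cnt)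
      PySem.Dict.empty
  let cntS := PySem.List.sorted cnt.items (fun d => d.2) true
  let fin := (PySem.List.slice cntS none (some threshold)).foldl
      (fun (st : PySem.Dict String Int × Int) kv => (st.1.insert kv.1 st.2, st.2 + 1))
      (PySem.Dict.empty, 0)
  fin.1.items

-- ===== PORT B =====
def get_letter_dict_alt (data : List String) (threshold : Int) : List (String × Int) :=
  let cnt : PySem.Dict String Int :=
    data.foldl (fun cnt s =>
      s.toList.foldl (fun cnt l =>
        let ls := String.ofList [l]
        cnt.insert ls (cnt.getD ls 0 + 1)) cnt)
      PySem.Dict.empty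
  let buckets : PySem.Dict Int (List String) :=
    cnt.items.foldl (fun b p => b.insert p.2 (b.getD p.2 [] ++ [p.1])) PySem.Dict.empty
  let maxf : Int :=
    match PySem.List.max? buckets.keys (fun x => x) with
    | some m => m
    | none => 0
  let order : List String :=
    (PySem.List.pyRange maxf 0 (-1)).foldl (fun acc f => acc ++ buckets.getD f []) []
  let fin := (PySem.List.enumerate (PySem.List.slice order none (some threshold))).foldl
      (fun (d : PySem.Dict String Int) il => d.insert il.2 il.1) PySem.Dict.empty
  fin.items

-- ===== PRECONDITION & SPEC =====
def Spec_get_letter_dict (data : List String) (threshold : Int) (out : List (String × Int)) : Prop := out = get_letter_dict_alt data threshold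
instance (data : List String) (threshold : Int) (out : List (String × Int)) : Decidable (Spec_get_letter_dict data threshold out) := by unfold Spec_get_letter_dict; infer_instance

-- ===== CLAIM (what is proved, stated in full; the proofs are below) =====
def Claim_equal_get_letter_dict : Prop := ∀ (data : List String) (threshold : Int), Dom_get_letter_dict data threshold → Spec_get_letter_dict data threshold (get_letter_dict data threshold)

-- ===== LEMMAS AND PROOFS =====

-- A's guarded count update equals B's get-with-default update.
theorem pv_count_step (d : PySem.Dict String Int) (k : String) :
    (if d.contains k then d.modify k 0 (· + 1) else d.insert k 1)
    = d.insert k (d.getD k 0 + 1) := by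
  by_cases h : d.contains k = true
  · simp [h, PySem.Dict.modify]
  · have hf : d.items.find? (fun p => p.1 == k) = none := by
      apply List.find?_eq_none.mpr
      intro p hp
      have := List.any_eq_false.mp (Bool.not_eq_true _ ▸ h) p hp
      simpa using this
    simp [h, PySem.Dict.getD, PySem.Dict.get?, hf]

theorem pv_foldl_preserve {α β : Type} (P : β → Prop) (f : β → α → β)
    (hf : ∀ b x, P b → P (f b x)) :
    ∀ (xs : List α) (b : β), P b → P (xs.foldl f b) := by
  intro xs
  induction xs with
  | nil => intro b hb; exact hb
  | cons x t ih => intro b hb; exact ih _ (hf b x hb)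

theorem pv_mem_insert {κ ν : Type} [BEq κ] (d : PySem.Dict κ ν) (k : κ) (v : ν)
    (p : κ × ν) (hp : p ∈ (d.insert k v).items) : p ∈ d.items ∨ p.2 = v := by
  unfold PySem.Dict.insert at hp
  by_cases h : d.contains k = true
  · rw [if_pos h] at hp
    rcases List.mem_map.mp hp with ⟨q, hq, hqe⟩
    by_cases hqk : (q.1 == k) = true
    · right; rw [if_pos hqk] at hqe; rw [← hqe]
    · left; rw [if_neg hqk] at hqe; rwa [← hqe]
  · rw [if_neg h] at hp
    rcases List.mem_append.mp hp with hp | hp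
    · left; exact hp
    · right; rw [List.mem_singleton.mp hp]

theorem pv_getD_nonneg (d : PySem.Dict String Int) (k : String)
    (h : ∀ p ∈ d.items, 1 ≤ p.2) : 0 ≤ d.getD k 0 := by
  unfold PySem.Dict.getD PySem.Dict.get?
  cases hf : d.items.find? (fun p => p.1 == k) with
  | none => simp
  | some q =>
      have := h q (List.mem_of_find?_eq_some hf)
      simp
      omega

-- all counts produced by the counting loop are ≥ 1
theorem pv_cnt_pos (data : List String) :
    ∀ p ∈ (data.foldl (fun cnt s =>
        s.toList.foldl (fun cnt l =>
          cnt.insert (String.ofList [l]) (cnt.getD (String.ofList [l]) 0 + 1)) cnt)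
        (PySem.Dict.empty : PySem.Dict String Int)).items, 1 ≤ p.2 := by
  have hinner : ∀ (s : String) (cnt : PySem.Dict String Int),
      (∀ p ∈ cnt.items, 1 ≤ p.2) →
      ∀ p ∈ (s.toList.foldl (fun cnt l =>
          cnt.insert (String.ofList [l]) (cnt.getD (String.ofList [l]) 0 + 1)) cnt).items, 1 ≤ p.2 := by
    intro s cnt hc
    refine pv_foldl_preserve (fun d : PySem.Dict String Int => ∀ p ∈ d.items, 1 ≤ p.2) _ ?_ s.toList cnt hc
    intro b l hb p hp
    rcases pv_mem_insert _ _ _ p hp with h | h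
    · exact hb p h
    · have := pv_getD_nonneg b (String.ofList [l]) hb
      omega
  exact pv_foldl_preserve (fun d : PySem.Dict String Int => ∀ p ∈ d.items, 1 ≤ p.2)
    (fun cnt s => s.toList.foldl (fun cnt l =>
      cnt.insert (String.ofList [l]) (cnt.getD (String.ofList [l]) 0 + 1)) cnt)
    (fun b s hb => hinner s b hb) data PySem.Dict.empty
    (fun p hp => by simp [PySem.Dict.empty] at hp)

-- the bucket dictionary: lookup is the filtered letter list
theorem pv_bucket_getD (ps : List (String × Int)) :
    ∀ (b : PySem.Dict Int (List String)) (f : Int),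
    (ps.foldl (fun b p => b.insert p.2 (b.getD p.2 [] ++ [p.1])) b).getD f []
    = b.getD f [] ++ (ps.filter (fun p => p.2 == f)).map (fun p => p.1) := by
  induction ps with
  | nil => intro b f; simp
  | cons p t ih =>
      intro b f
      simp only [List.foldl_cons, ih]
      by_cases h : f = p.2
      · subst h
        simp [PySem.Dict.getD_insert]
      · have hne : (p.2 == f) = false := by simp [Ne.symm h]
        simp [PySem.Dict.getD_insert, h, hne]

theorem pv_bucket_contains (ps : List (String × Int)) :
    ∀ (b : PySem.Dict Int (List String)) (f : Int),
    (ps.foldl (fun b p => b.insert p.2 (b.getD p.2 [] ++ [p.1])) b).contains f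
    = (b.contains f || ps.any (fun p => p.2 == f)) := by
  induction ps with
  | nil => intro b f; simp
  | cons p t ih =>
      intro b f
      simp only [List.foldl_cons, ih, PySem.Dict.contains_insert, List.any_cons]
      by_cases h : f = p.2
      · subst h; simp
      · have h1 : (f == p.2) = false := by simp [h]
        have h2 : (p.2 == f) = false := by simp [Ne.symm h]
        simp [h1, h2]

theorem pv_mem_keys_of_contains {κ ν : Type} [BEq κ] [LawfulBEq κ]
    (d : PySem.Dict κ ν) (k : κ) (h : d.contains k = true) : k ∈ d.keys := by
  unfold PySem.Dict.contains at h
  obtain ⟨p, hp, hpk⟩ := List.any_eq_true.mp h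
  have : p.1 = k := by simpa using hpk
  unfold PySem.Dict.keys
  exact this ▸ List.mem_map_of_mem hp

-- insertBy walks past elements it is not inserted before
theorem pv_insertBy_skip {α : Type} (bef : α → α → Bool) (x : α) :
    ∀ (as bs : List α), (∀ y ∈ as, bef x y = false) →
    PySem.List.insertBy bef x (as ++ bs) = as ++ PySem.List.insertBy bef x bs := by
  intro as
  induction as with
  | nil => intro bs _; simp
  | cons a t ih =>
      intro bs h
      have ha : bef x a = false := h a (by simp)
      simp [PySem.List.insertBy, ha]
      exact ih bs (fun y hy => h y (by simp [hy]))

theorem pv_insertBy_front {α : Type} (bef : α → α → Bool) (x : α) (bs : List α)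
    (h : ∀ y ∈ bs, bef x y = true) :
    PySem.List.insertBy bef x bs = x :: bs := by
  cases bs with
  | nil => simp [PySem.List.insertBy]
  | cons b t => simp [PySem.List.insertBy, h b (by simp)]

-- inserting an element of key f into a descending bucket concatenation appends it to bucket f
theorem pv_ins (x : String × Int) (hx1 : 1 ≤ x.2) :
    ∀ (n : Nat) (m : Int), m = (n : Int) → x.2 ≤ m →
    ∀ (g : Int → List (String × Int)), (∀ f, ∀ p ∈ g f, p.2 = f) →
    PySem.List.insertBy (fun a b => decide (b.2 < a.2)) x ((PySem.List.pyRange m 0 (-1)).flatMap g)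
    = (PySem.List.pyRange m 0 (-1)).flatMap (fun f => g f ++ if x.2 == f then [x] else []) := by
  intro n
  induction n with
  | zero => intro m hm hxm g hg; omega
  | succ n ih =>
      intro m hm hxm g hg
      have hm0 : (0 : Int) < m := by omega
      rw [PySem.List.pyRange_neg_one_cons hm0]
      simp only [List.flatMap_cons]
      by_cases hx : x.2 = m
      · have hskip : ∀ y ∈ g m, (fun a b => decide (b.2 < a.2)) x y = false := by
          intro y hy
          have := hg m y hy
          simp [this, hx]
        rw [pv_insertBy_skip _ _ _ _ hskip]
        have hrest : ∀ y ∈ (PySem.List.pyRange (m - 1) 0 (-1)).flatMap g,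
            (fun a b => decide (b.2 < a.2)) x y = true := by
          intro y hy
          obtain ⟨f, hf, hyf⟩ := List.mem_flatMap.mp hy
          have hb := PySem.List.mem_pyRange_neg_one.mp hf
          have := hg f y hyf
          simp only [decide_eq_true_iff]
          omega
        rw [pv_insertBy_front _ _ _ hrest]
        have hxt : (x.2 == m) = true := by simp [hx]
        have hcong : ∀ f ∈ PySem.List.pyRange (m - 1) 0 (-1),
            g f ++ (if x.2 == f then [x] else []) = g f := by
          intro f hf
          have hb := PySem.List.mem_pyRange_neg_one.mp hf
          have : (x.2 == f) = false := by simp; omega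
          simp [this]
        rw [List.flatMap_congr hcong]
        simp [hxt]
      · have hskip : ∀ y ∈ g m, (fun a b => decide (b.2 < a.2)) x y = false := by
          intro y hy
          have := hg m y hy
          simp only [decide_eq_false_iff_not, not_lt]
          omega
        rw [pv_insertBy_skip _ _ _ _ hskip]
        rw [ih (m - 1) (by omega) (by omega) g hg]
        have hxf : (x.2 == m) = false := by simp [hx]
        simp [hxf]

-- stable reverse sort by count = descending bucket concatenation
theorem pv_sort_buckets (m : Int) :
    ∀ (l : List (String × Int)), (∀ p ∈ l, 1 ≤ p.2 ∧ p.2 ≤ m) →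
    PySem.List.sorted l (fun d => d.2) true
    = (PySem.List.pyRange m 0 (-1)).flatMap (fun f => l.filter (fun p => p.2 == f)) := by
  intro l
  induction l using List.reverseRecOn with
  | nil =>
      intro _
      rw [PySem.List.sorted_rev_eq_foldl_insertBy]
      simp only [List.foldl_nil]
      symm
      rw [List.flatMap_eq_nil_iff]
      intro f _
      simp
  | append_singleton t x ih =>
      intro h
      rw [PySem.List.sorted_rev_eq_foldl_insertBy, List.foldl_append]
      simp only [List.foldl_cons, List.foldl_nil]
      rw [← PySem.List.sorted_rev_eq_foldl_insertBy]
      rw [ih (fun p hp => h p (by simp [hp]))]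
      have hx := h x (by simp)
      have hmn : (0 : Int) ≤ m := by omega
      rw [pv_ins x hx.1 m.toNat m (by omega) hx.2
        (fun f => t.filter (fun p => p.2 == f))
        (fun f p hp => by simpa using (List.mem_filter.mp hp).2)]
      apply List.flatMap_congr
      intro f _
      by_cases hf : (x.2 == f) = true
      · simp [List.filter_append, hf]
      · simp only [Bool.not_eq_true] at hf
        simp [List.filter_append, hf]

-- slicing commutes with map
theorem pv_slice_map {α β : Type} (g : α → β) (l : List α) (t : Int) :
    PySem.List.slice (l.map g) none (some t) = (PySem.List.slice l none (some t)).map g := by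
  simp [PySem.List.slice, PySem.List.clampIdx, List.map_take]

-- A's counter-indexed dict build = B's enumerate-driven dict build
theorem pv_fold_pairs (ps : List (String × Int)) :
    ∀ (d : PySem.Dict String Int) (c : Int),
    (ps.foldl (fun (st : PySem.Dict String Int × Int) kv => (st.1.insert kv.1 st.2, st.2 + 1)) (d, c)).1
    = (PySem.List.enumerate (ps.map (fun p => p.1)) c).foldl
        (fun (d : PySem.Dict String Int) il => d.insert il.2 il.1) d := by
  induction ps with
  | nil => intro d c; rfl
  | cons p t ih =>
      intro d c
      simp [PySem.List.enumerate_cons, ih]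

theorem pv_main (data : List String) (threshold : Int) :
    get_letter_dict data threshold = get_letter_dict_alt data threshold := by
  simp only [get_letter_dict, get_letter_dict_alt, pv_count_step]
  set cnt : PySem.Dict String Int :=
    data.foldl (fun cnt s =>
      s.toList.foldl (fun cnt l =>
        cnt.insert (String.ofList [l]) (cnt.getD (String.ofList [l]) 0 + 1)) cnt)
      PySem.Dict.empty with hcnt
  have hpos : ∀ p ∈ cnt.items, 1 ≤ p.2 := by
    rw [hcnt]
    exact pv_cnt_pos data
  set buckets : PySem.Dict Int (List String) :=
    cnt.items.foldl (fun b p => b.insert p.2 (b.getD p.2 [] ++ [p.1])) PySem.Dict.empty with hbuckets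
  cases hm : PySem.List.max? buckets.keys (fun x => x) with
  | none =>
      have hkeys : buckets.keys = [] := (PySem.List.max?_eq_none_iff _ _).mp hm
      have hitems : cnt.items = [] := by
        cases hp : cnt.items with
        | nil => rfl
        | cons p t =>
            exfalso
            have hc : buckets.contains p.2 = true := by
              rw [hbuckets, pv_bucket_contains]
              simp [hp]
            have := pv_mem_keys_of_contains buckets p.2 hc
            rw [hkeys] at this
            simp at this
      rw [hitems, PySem.List.sorted_rev_eq_foldl_insertBy]
      simp [PySem.List.slice, PySem.Dict.empty, PySem.List.pyRange_neg_one_eq_nil]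
  | some m =>
      have hle : ∀ p ∈ cnt.items, p.2 ≤ m := by
        intro p hp
        have hc : buckets.contains p.2 = true := by
          rw [hbuckets, pv_bucket_contains]
          have : cnt.items.any (fun q => q.2 == p.2) = true :=
            List.any_eq_true.mpr ⟨p, hp, by simp⟩
          simp [this]
        exact PySem.List.max?_isMax hm _ (pv_mem_keys_of_contains buckets p.2 hc)
      have hred : (match some m with | some x => x | none => (0 : Int)) = m := rfl
      rw [hred]
      have horder :
          (PySem.List.pyRange m 0 (-1)).foldl (fun acc f => acc ++ buckets.getD f []) []
          = (PySem.List.sorted cnt.items (fun d => d.2) true).map (fun p => p.1) := by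
        rw [PySem.List.foldl_append_eq_flatMap, List.nil_append]
        have hb : ∀ f, buckets.getD f []
            = (cnt.items.filter (fun p => p.2 == f)).map (fun p => p.1) := by
          intro f
          rw [hbuckets, pv_bucket_getD]
          simp [PySem.Dict.empty, PySem.Dict.getD, PySem.Dict.get?]
        simp only [hb]
        rw [pv_sort_buckets m cnt.items (fun p hp => ⟨hpos p hp, hle p hp⟩), List.map_flatMap]
      rw [horder, pv_slice_map, pv_fold_pairs]

-- ===== VERDICT (by name: the statement is the Claim_ definition above) =====
theorem get_letter_dict_spec : Claim_equal_get_letter_dict := by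
  intro data threshold _
  unfold Spec_get_letter_dict
  exact pv_main data threshold
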